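-- pv_equiv track=rewrite | github.com/AlexAbades/Alex_Python | 2 - Python Bootcamp/Lesson_2_Functions/Lesser_two_evens.py | count_69
-- ===== SOURCE A (Python) =====
-- def count_69(lst):
--     """
--     Create a list with the numbers that are between two numbers of a given list. Then we rest the sum of
--     the new list to the sum of the original list
--     :param lst: Normal list
--     :return: the sum of the original list minus the sum f the new list
--     """
--     add = False
--     six_nine = []
--     for element in lst:
--         while not add:
--             if element == 6:
--                 add = True
--                 break
--             else:
--                 break
--         while add:
--             six_nine.append(element)
--             if element == 9:
--                 add = False
--                 break
--             else:
--                 break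
--
--
--     return sum(lst)-sum(six_nine)
-- ===== SOURCE B (Python) =====
-- def count_69(lst):
--     total = 0
--     it = iter(lst)
--     for x in it:
--         if x == 6:
--             for y in it:
--                 if y == 9:
--                     break
--         else:
--             total += x
--     return total
-- ===== Notes on version B (the rewrite author's own statement) =====
-- stated objective: simpler
-- what changed: Single direct pass with a shared iterator that skips each 6..9 block and accumulates the kept elements, instead of building an auxiliary list with a toggle flag and subtracting two full sums.
import Mathlib
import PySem

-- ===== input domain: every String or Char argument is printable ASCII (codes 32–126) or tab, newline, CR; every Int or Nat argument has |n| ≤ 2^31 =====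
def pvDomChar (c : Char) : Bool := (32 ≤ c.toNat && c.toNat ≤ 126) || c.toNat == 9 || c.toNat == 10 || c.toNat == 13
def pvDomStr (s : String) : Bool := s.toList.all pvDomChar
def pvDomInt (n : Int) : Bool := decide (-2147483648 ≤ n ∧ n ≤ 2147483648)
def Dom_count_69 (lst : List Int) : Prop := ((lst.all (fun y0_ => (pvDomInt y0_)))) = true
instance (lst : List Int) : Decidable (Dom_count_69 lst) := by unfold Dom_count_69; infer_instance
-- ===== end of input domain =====

-- B changes the decomposition (simpler): one direct pass skipping each 6..9 block, no auxiliary list, no double sum.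

-- ===== PORT A =====
-- A's for-loop carrying the state (add, six_nine); the two inner `while`s each run at
-- most one iteration (every branch breaks), so they are the two conditional steps below.
def count_69_loop (add : Bool) (six_nine : List Int) : List Int → Bool × List Int
  | [] => (add, six_nine)
  | e :: rest =>
    let add' := if !add && e = 6 then true else add
    if add' then
      count_69_loop (if e = 9 then false else add') (six_nine ++ [e]) rest
    else
      count_69_loop add' six_nine rest

def count_69 (lst : List Int) : Int :=
  lst.sum - (count_69_loop false [] lst).2.sum

-- ===== PORT B =====
-- the inner `for y in it` loop: consumes the shared iterator up to and including the first 9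
def skipTo9 : List Int → List Int
  | [] => []
  | y :: t => if y = 9 then t else skipTo9 t

theorem skipTo9_length_le (t : List Int) : (skipTo9 t).length ≤ t.length := by
  induction t with
  | nil => simp [skipTo9]
  | cons y t ih => simp only [skipTo9]; split <;> simp <;> omega

-- the outer `for x in it` loop with accumulator total
def altLoop (total : Int) : List Int → Int
  | [] => total
  | x :: t => if x = 6 then altLoop total (skipTo9 t) else altLoop (total + x) t
termination_by l => l.length
decreasing_by
  · exact Nat.lt_succ_of_le (skipTo9_length_le t)
  · simp

def count_69_alt (lst : List Int) : Int := altLoop 0 lst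

-- ===== PRECONDITION & SPEC =====
def Spec_count_69 (lst : List Int) (out : Int) : Prop := out = count_69_alt lst
instance (lst : List Int) (out : Int) : Decidable (Spec_count_69 lst out) := by unfold Spec_count_69; infer_instance

-- ===== CLAIM (what is proved, stated in full; the proofs are below) =====
def Claim_equal_count_69 : Prop := ∀ (lst : List Int), Dom_count_69 lst → Spec_count_69 lst (count_69 lst)

-- ===== LEMMAS AND PROOFS =====
theorem altLoop_acc (l : List Int) : ∀ total, altLoop total l = total + altLoop 0 l := by
  induction hn : l.length using Nat.strong_induction_on generalizing l with
  | _ n ih =>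
    subst hn
    match l with
    | [] => intro total; simp [altLoop]
    | x :: t =>
      intro total
      by_cases hx : x = 6
      · rw [altLoop, altLoop, if_pos hx, if_pos hx,
          ih (skipTo9 t).length (Nat.lt_succ_of_le (skipTo9_length_le t)) _ rfl total]
      · rw [altLoop, altLoop, if_neg hx, if_neg hx,
          ih t.length (Nat.lt_succ_self _) _ rfl (total + x),
          ih t.length (Nat.lt_succ_self _) _ rfl (0 + x)]
        ring

theorem loop_sum (rest : List Int) :
    ∀ sn : List Int,
      (count_69_loop false sn rest).2.sum = sn.sum + rest.sum - altLoop 0 rest ∧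
      (count_69_loop true sn rest).2.sum = sn.sum + rest.sum - altLoop 0 (skipTo9 rest) := by
  induction rest with
  | nil => intro sn; simp [count_69_loop, altLoop, skipTo9]
  | cons e t ih =>
    intro sn
    constructor
    · by_cases h6 : e = 6
      · subst h6
        simp only [count_69_loop, altLoop]
        norm_num
        rw [(ih (sn ++ [6])).2]
        simp; ring
      · simp only [count_69_loop, altLoop]
        rw [if_neg (by simp [h6]), if_neg (by simp [h6]), if_neg h6]
        rw [(ih sn).1, altLoop_acc t (0 + e)]
        simp; ring
    · by_cases h9 : e = 9
      · subst h9
        simp only [count_69_loop, skipTo9]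
        norm_num
        rw [(ih (sn ++ [9])).1]
        simp; ring
      · simp only [count_69_loop, skipTo9]
        rw [if_pos (by simp), if_neg h9, if_neg h9, ite_self]
        rw [(ih (sn ++ [e])).2]
        simp; ring

-- ===== VERDICT (by name: the statement is the Claim_ definition above) =====
theorem count_69_spec : Claim_equal_count_69 := by
  intro lst _
  unfold Spec_count_69 count_69 count_69_alt
  rw [(loop_sum lst []).1]
  simp
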